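-- pv_equiv track=rewrite | github.com/the-Luthier/casestudy | solution/src/ggf_case/patch/apply_patch.py | _find_hunk_index
-- ===== SOURCE A (Python) =====
-- def _find_hunk_index(file_lines: list[str], removes: list[str], old_start: int) -> int | None:
--     """
--     Find the best match position for a hunk removal block.
--     Turkce: Hunk silme blogu icin en uygun eslesme konumunu bulur.
--     """
--     if not removes:
--         idx = max(min(old_start - 1, len(file_lines)), 0)
--         return idx
--
--     preferred = max(old_start - 1, 0)
--     if file_lines[preferred:preferred + len(removes)] == removes:
--         return preferred
--
--     matches: list[int] = []
--     max_start = len(file_lines) - len(removes)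
--     if max_start >= 0:
--         for i in range(max_start + 1):
--             if file_lines[i:i + len(removes)] == removes:
--                 matches.append(i)
--     if not matches:
--         return None
--
--     return min(matches, key=lambda i: abs(i - preferred))
-- ===== SOURCE B (Python) =====
-- def _find_hunk_index(file_lines: list[str], removes: list[str], old_start: int) -> int | None:
--     """Outward scan from the preferred position: try distance 0, then 1, 2, ...
--     (lower index first on ties) and return the first window that matches.
--     If the preferred position lies beyond the last window, the nearest match is
--     simply the last one, so scan backwards from the last window instead."""
--     n = len(file_lines)
--     m = len(removes)
--     if m == 0:
--         return min(max(old_start - 1, 0), n)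
--
--     preferred = max(old_start - 1, 0)
--
--     def ok(i: int) -> bool:
--         return 0 <= i <= n - m and file_lines[i:i + m] == removes
--
--     if ok(preferred):
--         return preferred
--     if preferred > n - m:
--         for i in range(n - m, -1, -1):
--             if ok(i):
--                 return i
--         return None
--     for d in range(1, max(preferred, n - m - preferred) + 1):
--         if ok(preferred - d):
--             return preferred - d
--         if ok(preferred + d):
--             return preferred + d
--     return None
-- ===== Notes on version B (the rewrite author's own statement) =====
-- stated objective: alternative
-- what changed: Instead of collecting all match positions and taking min by distance, B scans outward from the preferred index (distance 1, 2, ..., lower index first) and returns the first matching window; when the preferred index lies beyond the last window it scans backwards from the last window, since the nearest match is then the topmost one.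
import Mathlib
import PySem

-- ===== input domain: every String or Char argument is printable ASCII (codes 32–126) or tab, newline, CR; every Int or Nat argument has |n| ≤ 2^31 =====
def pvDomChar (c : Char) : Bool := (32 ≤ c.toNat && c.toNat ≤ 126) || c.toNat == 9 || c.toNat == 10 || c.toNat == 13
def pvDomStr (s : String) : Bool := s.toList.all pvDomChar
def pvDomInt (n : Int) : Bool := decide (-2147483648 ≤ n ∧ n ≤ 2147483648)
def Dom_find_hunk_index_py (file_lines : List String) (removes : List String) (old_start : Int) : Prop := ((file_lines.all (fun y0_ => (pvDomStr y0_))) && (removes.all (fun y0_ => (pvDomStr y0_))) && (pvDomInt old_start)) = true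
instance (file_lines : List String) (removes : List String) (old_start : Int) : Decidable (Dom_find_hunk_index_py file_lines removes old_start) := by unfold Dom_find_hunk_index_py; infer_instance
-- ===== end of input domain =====

-- B replaces A's collect-all-matchesA-then-min-by-distance pass with an outward scan from the
-- preferred index that returns the first (hence nearest, lower-index-on-tie) matching window.

-- ===== PORT A =====
def find_hunk_index_py (file_lines : List String) (removes : List String) (old_start : Int) : Option Int :=
  if removes = [] then
    some (max (min (old_start - 1) (file_lines.length : Int)) 0)
  else
    let preferred : Int := max (old_start - 1) 0
    if PySem.List.slice file_lines (some preferred) (some (preferred + (removes.length : Int))) = removes then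
      some preferred
    else
      let max_start : Int := (file_lines.length : Int) - (removes.length : Int)
      let matchesA : List Int :=
        if max_start ≥ 0 then
          (PySem.List.pyRange 0 (max_start + 1) 1).foldl
            (fun acc i =>
              if PySem.List.slice file_lines (some i) (some (i + (removes.length : Int))) = removes then
                acc ++ [i]
              else acc) []
        else []
      if matchesA = [] then none
      else PySem.List.min? matchesA (fun i => |i - preferred|)

-- ===== PORT B =====
-- Source B's local 'ok(i)': 0 <= i <= n - m and file_lines[i:i+m] == removes
def pvOkB (file_lines removes : List String) (i : Int) : Bool :=
  decide (0 ≤ i) && decide (i ≤ (file_lines.length : Int) - (removes.length : Int)) &&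
    decide (PySem.List.slice file_lines (some i) (some (i + (removes.length : Int))) = removes)

-- Source B's 'for d in range(1, bound+1)' loop, fuel = number of remaining distances
def pvScanB (file_lines removes : List String) (preferred : Int) : Nat → Int → Option Int
  | 0, _ => none
  | fuel + 1, d =>
    if pvOkB file_lines removes (preferred - d) then some (preferred - d)
    else if pvOkB file_lines removes (preferred + d) then some (preferred + d)
    else pvScanB file_lines removes preferred fuel (d + 1)

-- Source B's 'for i in range(n - m, -1, -1)' backward loop, fuel = number of remaining indices
def pvScanDown (file_lines removes : List String) : Int → Nat → Option Int
  | _, 0 => none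
  | i, fuel + 1 =>
    if pvOkB file_lines removes i then some i
    else pvScanDown file_lines removes (i - 1) fuel

def find_hunk_index_py_alt (file_lines : List String) (removes : List String) (old_start : Int) : Option Int :=
  if removes.length = 0 then
    some (min (max (old_start - 1) 0) (file_lines.length : Int))
  else
    let preferred : Int := max (old_start - 1) 0
    if pvOkB file_lines removes preferred then some preferred
    else if preferred > (file_lines.length : Int) - (removes.length : Int) then
      pvScanDown file_lines removes ((file_lines.length : Int) - (removes.length : Int))
        (((file_lines.length : Int) - (removes.length : Int) + 1).toNat)
    else
      pvScanB file_lines removes preferred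
        ((max preferred ((file_lines.length : Int) - (removes.length : Int) - preferred)).toNat) 1

-- ===== PRECONDITION & SPEC =====
def Spec_find_hunk_index_py (file_lines : List String) (removes : List String) (old_start : Int) (out : Option Int) : Prop := out = find_hunk_index_py_alt file_lines removes old_start
instance (file_lines : List String) (removes : List String) (old_start : Int) (out : Option Int) : Decidable (Spec_find_hunk_index_py file_lines removes old_start out) := by unfold Spec_find_hunk_index_py; infer_instance

-- ===== CLAIM (what is proved, stated in full; the proofs are below) =====
def Claim_equal_find_hunk_index_py : Prop := ∀ (file_lines : List String) (removes : List String) (old_start : Int), Dom_find_hunk_index_py file_lines removes old_start → Spec_find_hunk_index_py file_lines removes old_start (find_hunk_index_py file_lines removes old_start)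

-- ===== LEMMAS AND PROOFS =====

-- Python's min(xs, key=k) as a fold keeping the FIRST minimum
def pvMinStep (k : Int → Int) (acc : Option Int) (x : Int) : Option Int :=
  match acc with
  | none => some x
  | some m => if k x < k m then some x else some m

theorem pvMin?_eq_foldl (xs : List Int) (k : Int → Int) :
    PySem.List.min? xs k = xs.foldl (pvMinStep k) none := by
  unfold PySem.List.min?
  congr 1
  funext acc x
  cases acc <;> rfl

theorem pvFoldl_keep (k : Int → Int) (l : List Int) (b : Int)
    (h : ∀ y ∈ l, ¬ (k y < k b)) : l.foldl (pvMinStep k) (some b) = some b := by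
  induction l with
  | nil => rfl
  | cons x t ih =>
    simp only [List.foldl_cons, pvMinStep]
    rw [if_neg (h x (by simp))]
    exact ih (fun y hy => h y (by simp [hy]))

theorem pvMin?_go (k : Int → Int) (l₂ : List Int) (mm : Int)
    (h2 : ∀ y ∈ l₂, k mm ≤ k y) :
    ∀ (l₁ : List Int) (acc : Option Int), (∀ y ∈ l₁, k mm < k y) →
      (acc = none ∨ ∃ b, acc = some b ∧ k mm < k b) →
      (l₁ ++ mm :: l₂).foldl (pvMinStep k) acc = some mm := by
  intro l₁
  induction l₁ with
  | nil =>
    intro acc h1 hacc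
    have hstep : pvMinStep k acc mm = some mm := by
      rcases hacc with rfl | ⟨b, rfl, hb⟩
      · rfl
      · simp [pvMinStep, if_pos hb]
    simp only [List.nil_append, List.foldl_cons, hstep]
    exact pvFoldl_keep k l₂ mm (fun y hy => not_lt.2 (h2 y hy))
  | cons x t ih =>
    intro acc h1 hacc
    simp only [List.cons_append, List.foldl_cons]
    have hx : k mm < k x := h1 x (by simp)
    refine ih _ (fun y hy => h1 y (by simp [hy])) ?_
    rcases hacc with rfl | ⟨b, rfl, hb⟩
    · exact Or.inr ⟨x, rfl, hx⟩
    · simp only [pvMinStep]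
      split_ifs with h
      · exact Or.inr ⟨x, rfl, hx⟩
      · exact Or.inr ⟨b, rfl, hb⟩

theorem pvMin?_first (k : Int → Int) (l₁ l₂ : List Int) (mm : Int)
    (h1 : ∀ y ∈ l₁, k mm < k y) (h2 : ∀ y ∈ l₂, k mm ≤ k y) :
    PySem.List.min? (l₁ ++ mm :: l₂) k = some mm := by
  rw [pvMin?_eq_foldl]
  exact pvMin?_go k l₂ mm h2 l₁ none h1 (Or.inl rfl)

-- a matching slice of a nonempty pattern fits inside the list
theorem pvSlice_imp_le (fl rm : List String) (i : Int) (hi : 0 ≤ i) (hrm : rm ≠ [])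
    (h : PySem.List.slice fl (some i) (some (i + (rm.length : Int))) = rm) :
    i ≤ (fl.length : Int) - (rm.length : Int) := by
  have h0 : (0:Int) ≤ i + (rm.length : Int) := by positivity
  rw [PySem.List.slice_toNat fl hi h0] at h
  have hlen := congrArg List.length h
  simp only [List.length_take, List.length_drop] at hlen
  have hne : rm.length ≠ 0 := by simpa using hrm
  omega

theorem pvOkB_iff (fl rm : List String) (i : Int) (hi : 0 ≤ i) (hrm : rm ≠ []) :
    pvOkB fl rm i = true ↔
      PySem.List.slice fl (some i) (some (i + (rm.length : Int))) = rm := by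
  unfold pvOkB
  simp only [Bool.and_eq_true, decide_eq_true_eq]
  constructor
  · rintro ⟨⟨_, _⟩, h⟩; exact h
  · intro h; exact ⟨⟨hi, pvSlice_imp_le fl rm i hi hrm h⟩, h⟩

theorem pvOkB_le (fl rm : List String) (i : Int) (h : pvOkB fl rm i = true) :
    0 ≤ i ∧ i ≤ (fl.length : Int) - (rm.length : Int) := by
  unfold pvOkB at h
  simp only [Bool.and_eq_true, decide_eq_true_eq] at h
  exact ⟨h.1.1, h.1.2⟩

-- A's collecting loop is a filter
theorem pvFoldl_filter (P : Int → Prop) [DecidablePred P] :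
    ∀ (xs init : List Int),
      xs.foldl (fun acc i => if P i then acc ++ [i] else acc) init
        = init ++ xs.filter (fun i => decide (P i)) := by
  intro xs
  induction xs with
  | nil => intro init; simp
  | cons x t ih =>
    intro init
    simp only [List.foldl_cons, List.filter_cons]
    by_cases h : P x
    · rw [if_pos h, ih]; simp [h]
    · rw [if_neg h, ih]; simp [h]

-- B's scan when there is no match at all
theorem pvScanB_none (fl rm : List String) (p : Int)
    (hall : ∀ i, pvOkB fl rm i = false) :
    ∀ (fuel : Nat) (d : Int), pvScanB fl rm p fuel d = none := by
  intro fuel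
  induction fuel with
  | zero => intro d; rfl
  | succ f ih =>
    intro d
    simp only [pvScanB, hall]
    exact ih (d + 1)

-- B's scan when the nearest match is at distance d0
theorem pvScanB_hit (fl rm : List String) (p r : Int) (d0 : Nat)
    (hmin : ∀ e : Nat, e < d0 →
      pvOkB fl rm (p - e) = false ∧ pvOkB fl rm (p + e) = false)
    (hr : (pvOkB fl rm (p - d0) = true ∧ r = p - d0) ∨
          (pvOkB fl rm (p - d0) = false ∧ pvOkB fl rm (p + d0) = true ∧ r = p + d0)) :
    ∀ (fuel d : Nat), d ≤ d0 → d0 - d < fuel →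
      pvScanB fl rm p fuel (d : Int) = some r := by
  intro fuel
  induction fuel with
  | zero => intro d _ h; omega
  | succ f ih =>
    intro d hd hlt
    by_cases hdd : d = d0
    · subst hdd
      rcases hr with ⟨h1, hre⟩ | ⟨h1, h2, hre⟩
      · simp [pvScanB, h1, hre]
      · simp [pvScanB, h1, h2, hre]
    · have hdlt : d < d0 := lt_of_le_of_ne hd hdd
      have hfe := hmin d hdlt
      simp only [pvScanB, hfe.1, hfe.2, Bool.false_eq_true, if_false]
      have hcast : ((d : Int) + 1) = ((d + 1 : Nat) : Int) := by push_cast; ring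
      rw [hcast]
      exact ih (d + 1) (by omega) (by omega)

-- B's backward scan when there is no match at all
theorem pvScanDown_none (fl rm : List String)
    (hall : ∀ i, pvOkB fl rm i = false) :
    ∀ (fuel : Nat) (i : Int), pvScanDown fl rm i fuel = none := by
  intro fuel
  induction fuel with
  | zero => intro i; rfl
  | succ f ih =>
    intro i
    simp only [pvScanDown, hall]
    exact ih (i - 1)

-- B's backward scan finds the topmost match r
theorem pvScanDown_hit (fl rm : List String) (r : Int)
    (hrP : pvOkB fl rm r = true) :
    ∀ (fuel : Nat) (i : Int), r ≤ i →
      (∀ z, r < z → z ≤ i → pvOkB fl rm z = false) →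
      (i - r).toNat < fuel →
      pvScanDown fl rm i fuel = some r := by
  intro fuel
  induction fuel with
  | zero => intro i _ _ h; omega
  | succ f ih =>
    intro i hri habove hfuel
    by_cases hir : i = r
    · subst hir
      simp [pvScanDown, hrP]
    · have hlt : r < i := lt_of_le_of_ne hri (fun h => hir h.symm)
      have hfe : pvOkB fl rm i = false := habove i hlt le_rfl
      simp only [pvScanDown, hfe, Bool.false_eq_true, if_false]
      exact ih (i - 1) (by omega) (fun z h1 h2 => habove z h1 (by omega)) (by omega)

-- ===== VERDICT (by name: the statement is the Claim_ definition above) =====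
theorem find_hunk_index_py_spec : Claim_equal_find_hunk_index_py := by
  intro fl rm os _
  unfold Spec_find_hunk_index_py find_hunk_index_py find_hunk_index_py_alt
  by_cases hrm : rm = []
  · subst hrm
    simp only [if_pos rfl, List.length_nil]
    have : (0:Int) ≤ (fl.length : Int) := Int.natCast_nonneg _
    simp only [Int.max_def, Int.min_def]
    split_ifs <;> exact congrArg some (by omega)
  · have hrm0 : rm.length ≠ 0 := by simpa using hrm
    rw [if_neg hrm, if_neg hrm0]
    set p : Int := max (os - 1) 0 with hpdef
    have hp0 : 0 ≤ p := le_max_right _ _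
    by_cases hok : pvOkB fl rm p = true
    · rw [if_pos ((pvOkB_iff fl rm p hp0 hrm).1 hok), if_pos hok]
    · have hslice : ¬ (PySem.List.slice fl (some p) (some (p + (rm.length : Int))) = rm) :=
        fun h => hok ((pvOkB_iff fl rm p hp0 hrm).2 h)
      rw [if_neg hslice, if_neg hok]
      set nm : Int := (fl.length : Int) - (rm.length : Int) with hnmdef
      by_cases hnm : nm ≥ 0
      · -- range is nonempty; A collects matches
        simp only [if_pos hnm]
        rw [pvFoldl_filter
          (fun i => PySem.List.slice fl (some i) (some (i + (rm.length : Int))) = rm)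
          (PySem.List.pyRange 0 (nm + 1) 1) []]
        rw [List.nil_append]
        have hfc : ∀ i ∈ PySem.List.pyRange 0 (nm + 1) 1,
            (decide (PySem.List.slice fl (some i) (some (i + (rm.length : Int))) = rm))
              = pvOkB fl rm i := by
          intro i hi
          have hi' := (PySem.List.mem_pyRange_one).1 hi
          by_cases h : PySem.List.slice fl (some i) (some (i + (rm.length : Int))) = rm
          · rw [decide_eq_true h, ((pvOkB_iff fl rm i hi'.1 hrm).2 h)]
          · rw [decide_eq_false h]
            rcases hb : pvOkB fl rm i with _ | _
            · rfl
            · exact absurd ((pvOkB_iff fl rm i hi'.1 hrm).1 hb) h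
        rw [List.filter_congr hfc]
        set M : List Int := (PySem.List.pyRange 0 (nm + 1) 1).filter (pvOkB fl rm) with hMdef
        by_cases hMnil : M = []
        · rw [if_pos hMnil]
          have hall : ∀ i, pvOkB fl rm i = false := by
            intro i
            rcases hb : pvOkB fl rm i with _ | _
            · rfl
            · exfalso
              have hle := pvOkB_le fl rm i hb
              have : i ∈ M := by
                rw [hMdef]
                exact List.mem_filter.2
                  ⟨(PySem.List.mem_pyRange_one).2 ⟨hle.1, by omega⟩, hb⟩
              rw [hMnil] at this
              exact absurd this (List.not_mem_nil)
          by_cases hpc : p > nm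
          · rw [if_pos hpc]
            exact (pvScanDown_none fl rm hall _ _).symm
          · rw [if_neg hpc]
            exact (pvScanB_none fl rm p hall _ _).symm
        · rw [if_neg hMnil]
          -- there is a match; find the nearest distance d0
          obtain ⟨y, hy⟩ := List.exists_mem_of_ne_nil M hMnil
          have hyP : pvOkB fl rm y = true := (List.mem_filter.1 (hMdef ▸ hy)).2
          have hex : ∃ e : Nat,
              pvOkB fl rm (p - e) = true ∨ pvOkB fl rm (p + e) = true := by
            refine ⟨(y - p).natAbs, ?_⟩
            rcases Int.natAbs_eq (y - p) with h | h
            · right; have : p + ((y - p).natAbs : Int) = y := by omega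
              rw [this]; exact hyP
            · left; have : p - ((y - p).natAbs : Int) = y := by omega
              rw [this]; exact hyP
          set d0 : Nat := Nat.find hex with hd0def
          have hQ := Nat.find_spec hex
          rw [← hd0def] at hQ
          have hminQ : ∀ e : Nat, e < d0 →
              pvOkB fl rm (p - e) = false ∧ pvOkB fl rm (p + e) = false := by
            intro e he
            have := Nat.find_min hex he
            push Not at this
            exact ⟨Bool.eq_false_iff.2 this.1, Bool.eq_false_iff.2 this.2⟩
          have hd0pos : 0 < d0 := by
            rcases Nat.eq_zero_or_pos d0 with h0 | h0
            · exfalso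
              rw [h0] at hQ
              simp only [Nat.cast_zero, sub_zero, add_zero] at hQ
              rcases hQ with hq | hq <;> exact hok hq
            · exact h0
          set r : Int := if pvOkB fl rm (p - (d0 : Int)) = true then p - d0 else p + d0
            with hrdef
          have hrP : pvOkB fl rm r = true := by
            rw [hrdef]; split_ifs with h
            · exact h
            · rcases hQ with hq | hq
              · exact absurd hq h
              · exact hq
          have hrabs : |r - p| = (d0 : Int) := by
            have h0 : (0:Int) ≤ (d0:Int) := Int.natCast_nonneg _
            rw [hrdef]
            split_ifs
            · have he : p - (d0:Int) - p = -(d0:Int) := by ring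
              rw [he, abs_neg, abs_of_nonneg h0]
            · have he : p + (d0:Int) - p = (d0:Int) := by ring
              rw [he, abs_of_nonneg h0]
          have hgood : ∀ z ∈ M, (d0 : Int) ≤ |z - p| := by
            intro z hz
            have hzP : pvOkB fl rm z = true := (List.mem_filter.1 (hMdef ▸ hz)).2
            have hQe : pvOkB fl rm (p - ((z - p).natAbs : Int)) = true ∨
                pvOkB fl rm (p + ((z - p).natAbs : Int)) = true := by
              rcases Int.natAbs_eq (z - p) with h | h
              · right; have : p + ((z - p).natAbs : Int) = z := by omega
                rw [this]; exact hzP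
              · left; have : p - ((z - p).natAbs : Int) = z := by omega
                rw [this]; exact hzP
            have hle : d0 ≤ (z - p).natAbs := Nat.find_min' hex hQe
            have : |z - p| = ((z - p).natAbs : Int) := Int.abs_eq_natAbs _
            omega
          have hrle := pvOkB_le fl rm r hrP
          have hrM : r ∈ M := by
            rw [hMdef]
            exact List.mem_filter.2
              ⟨(PySem.List.mem_pyRange_one).2 ⟨hrle.1, by omega⟩, hrP⟩
          obtain ⟨l₁, l₂, hMeq⟩ := List.append_of_mem hrM
          have hpair : M.Pairwise (· < ·) :=
            List.Pairwise.filter _ (PySem.List.pairwise_lt_pyRange_one 0 (nm + 1))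
          have hlt1 : ∀ z ∈ l₁, z < r := by
            rw [hMeq] at hpair
            intro z hz
            exact (List.pairwise_append.1 hpair).2.2 z hz r (by simp)
          -- A side: min? picks r
          have hA : PySem.List.min? M (fun i => |i - p|) = some r := by
            rw [hMeq]
            refine pvMin?_first _ l₁ l₂ r ?_ ?_
            · intro z hz
              have hzM : z ∈ M := by rw [hMeq]; simp [hz]
              have hge := hgood z hzM
              have hzlt := hlt1 z hz
              have hzP : pvOkB fl rm z = true := (List.mem_filter.1 (hMdef ▸ hzM)).2
              rw [hrabs]
              by_cases hc : pvOkB fl rm (p - (d0 : Int)) = true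
              · have hre : r = p - (d0 : Int) := by rw [hrdef, if_pos hc]
                rw [hre] at hzlt
                rcases abs_cases (z - p) with ⟨ha, _⟩ | ⟨ha, _⟩ <;>
                  rw [ha] at hge ⊢ <;> omega
              · have hre : r = p + (d0 : Int) := by rw [hrdef, if_neg hc]
                rw [hre] at hzlt
                have hzne : z ≠ p - (d0 : Int) := by
                  intro hzeq; rw [hzeq] at hzP; exact hc hzP
                rcases abs_cases (z - p) with ⟨ha, _⟩ | ⟨ha, _⟩ <;>
                  rw [ha] at hge ⊢ <;> omega
            · intro z hz
              have hzM : z ∈ M := by rw [hMeq]; simp [hz]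
              rw [hrabs]
              exact hgood z hzM
          rw [hA]
          -- B side: the scan stops at r
          have hrB : (pvOkB fl rm (p - (d0:Int)) = true ∧ r = p - d0) ∨
              (pvOkB fl rm (p - (d0:Int)) = false ∧ pvOkB fl rm (p + (d0:Int)) = true ∧
                r = p + d0) := by
            rw [hrdef]
            by_cases h : pvOkB fl rm (p - (d0 : Int)) = true
            · exact Or.inl ⟨h, by rw [if_pos h]⟩
            · refine Or.inr ⟨Bool.eq_false_iff.2 h, ?_, by rw [if_neg h]⟩
              rcases hQ with hq | hq
              · exact absurd hq h
              · exact hq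
          by_cases hpc : p > nm
          · -- preferred beyond the last window: B scans backwards from nm
            rw [if_pos hpc]
            have hreq : r = p - (d0 : Int) := by
              rcases hrB with ⟨_, hre⟩ | ⟨_, _, hre⟩
              · exact hre
              · exfalso; omega
            have habove : ∀ z, r < z → z ≤ nm → pvOkB fl rm z = false := by
              intro z h1 h2
              rcases hb : pvOkB fl rm z with _ | _
              · rfl
              · exfalso
                have hzle := pvOkB_le fl rm z hb
                have he : ∃ e : Nat, (e : Int) = p - z := ⟨(p - z).toNat, by omega⟩
                obtain ⟨e, hez⟩ := he
                have helt : e < d0 := by omega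
                have := (hminQ e helt).1
                rw [show p - (e : Int) = z by omega] at this
                rw [hb] at this
                exact absurd this (by simp)
            have := pvScanDown_hit fl rm r hrP ((nm + 1).toNat) nm
              (by omega) habove (by omega)
            exact this.symm
          · rw [if_neg hpc]
            have hF : (d0 : Int) ≤ max p (nm - p) := by
              have hx := hrabs
              rcases abs_cases (r - p) with ⟨ha, _⟩ | ⟨ha, _⟩ <;>
                rw [ha] at hx <;>
                rcases max_cases p (nm - p) with ⟨hm, _⟩ | ⟨hm, _⟩ <;>
                rw [hm] <;> omega
            have hscan := pvScanB_hit fl rm p r d0 hminQ hrB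
              (max p (nm - p)).toNat 1 (by omega) (by omega)
            simpa using hscan.symm
      · -- n < m : no window fits
        simp only [if_neg hnm]
        have hall : ∀ i, pvOkB fl rm i = false := by
          intro i
          rcases hb : pvOkB fl rm i with _ | _
          · rfl
          · exfalso; have := pvOkB_le fl rm i hb; omega
        rw [if_pos (by omega : p > nm)]
        exact (pvScanDown_none fl rm hall _ _).symm
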